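-- pv_equiv track=rewrite | github.com/shinelotto/shinelotto.github.io | blueprints/ssq_bp.py | calculate_zone_ratio
-- ===== SOURCE A (Python) =====
-- def calculate_zone_ratio(numbers):
--     """计算区间比"""
--     if not numbers:
--         return "0:0:0"
--     zone_counts = [
--         sum(1 for n in numbers if 1 <= n <= 11),
--         sum(1 for n in numbers if 12 <= n <= 22),
--         sum(1 for n in numbers if 23 <= n <= 33)
--     ]
--     return f"{zone_counts[0]}:{zone_counts[1]}:{zone_counts[2]}"
-- ===== SOURCE B (Python) =====
-- def calculate_zone_ratio(numbers):
--     """计算区间比"""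
--     counts = [0, 0, 0]
--     for n in numbers:
--         if 1 <= n <= 11:
--             counts[0] += 1
--         elif 12 <= n <= 22:
--             counts[1] += 1
--         elif 23 <= n <= 33:
--             counts[2] += 1
--     return f"{counts[0]}:{counts[1]}:{counts[2]}"
-- ===== Notes on version B (the rewrite author's own statement) =====
-- stated objective: simpler
-- what changed: Three separate counting comprehensions (three scans) replaced by a single pass maintaining a three-bucket counter with an if/elif chain, and the empty-list guard dropped since zero counters already format to '0:0:0'.
import Mathlib
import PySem

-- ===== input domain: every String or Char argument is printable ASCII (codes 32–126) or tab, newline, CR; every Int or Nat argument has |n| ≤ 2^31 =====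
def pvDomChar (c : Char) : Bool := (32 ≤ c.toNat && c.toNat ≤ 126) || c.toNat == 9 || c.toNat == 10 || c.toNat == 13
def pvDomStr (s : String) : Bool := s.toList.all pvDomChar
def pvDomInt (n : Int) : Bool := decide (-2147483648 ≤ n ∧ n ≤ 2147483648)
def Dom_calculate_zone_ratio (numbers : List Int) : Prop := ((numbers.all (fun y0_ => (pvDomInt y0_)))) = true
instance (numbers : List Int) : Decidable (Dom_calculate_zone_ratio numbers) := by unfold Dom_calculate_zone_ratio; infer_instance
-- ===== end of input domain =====

-- B replaces A's three counting scans with one pass over a three-bucket counter (simpler decomposition; same result).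
-- ===== PORT A =====
def calculate_zone_ratio (numbers : List Int) : String :=
  if numbers = [] then "0:0:0"
  else
    let z0 : Int := numbers.foldl (fun acc n => if 1 ≤ n ∧ n ≤ 11 then acc + 1 else acc) 0
    let z1 : Int := numbers.foldl (fun acc n => if 12 ≤ n ∧ n ≤ 22 then acc + 1 else acc) 0
    let z2 : Int := numbers.foldl (fun acc n => if 23 ≤ n ∧ n ≤ 33 then acc + 1 else acc) 0
    PySem.Int.toStr z0 ++ ":" ++ PySem.Int.toStr z1 ++ ":" ++ PySem.Int.toStr z2

-- ===== PORT B =====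
def pvStepB (c : Int × Int × Int) (n : Int) : Int × Int × Int :=
  if 1 ≤ n ∧ n ≤ 11 then (c.1 + 1, c.2.1, c.2.2)
  else if 12 ≤ n ∧ n ≤ 22 then (c.1, c.2.1 + 1, c.2.2)
  else if 23 ≤ n ∧ n ≤ 33 then (c.1, c.2.1, c.2.2 + 1)
  else c

def calculate_zone_ratio_alt (numbers : List Int) : String :=
  let counts := numbers.foldl pvStepB (0, 0, 0)
  PySem.Int.toStr counts.1 ++ ":" ++ PySem.Int.toStr counts.2.1 ++ ":" ++ PySem.Int.toStr counts.2.2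

-- ===== PRECONDITION & SPEC =====
def Spec_calculate_zone_ratio (numbers : List Int) (out : String) : Prop := out = calculate_zone_ratio_alt numbers
instance (numbers : List Int) (out : String) : Decidable (Spec_calculate_zone_ratio numbers out) := by unfold Spec_calculate_zone_ratio; infer_instance

-- ===== CLAIM (what is proved, stated in full; the proofs are below) =====
def Claim_equal_calculate_zone_ratio : Prop := ∀ (numbers : List Int), Dom_calculate_zone_ratio numbers → Spec_calculate_zone_ratio numbers (calculate_zone_ratio numbers)

-- ===== LEMMAS AND PROOFS =====

theorem pvFoldShift (p : Int → Prop) [DecidablePred p] (xs : List Int) : ∀ (a : Int),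
    xs.foldl (fun acc n => if p n then acc + 1 else acc) a
      = a + xs.foldl (fun acc n => if p n then acc + 1 else acc) 0 := by
  induction xs with
  | nil => intro a; simp
  | cons x xs ih =>
    intro a
    simp only [List.foldl_cons]
    rw [ih (if p x then a + 1 else a), ih (if p x then (0:Int) + 1 else 0)]
    split_ifs <;> ring

theorem pvFoldB_eq (xs : List Int) : ∀ (a b c : Int),
    xs.foldl pvStepB (a, b, c) =
      (a + xs.foldl (fun acc n => if 1 ≤ n ∧ n ≤ 11 then acc + 1 else acc) 0,
       b + xs.foldl (fun acc n => if 12 ≤ n ∧ n ≤ 22 then acc + 1 else acc) 0,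
       c + xs.foldl (fun acc n => if 23 ≤ n ∧ n ≤ 33 then acc + 1 else acc) 0) := by
  induction xs with
  | nil => intro a b c; simp
  | cons x xs ih =>
    intro a b c
    simp only [List.foldl_cons, pvStepB]
    rw [pvFoldShift (fun n => 1 ≤ n ∧ n ≤ 11) xs, pvFoldShift (fun n => 12 ≤ n ∧ n ≤ 22) xs,
        pvFoldShift (fun n => 23 ≤ n ∧ n ≤ 33) xs]
    split_ifs with p1 p2 p3 <;>
      simp [ih, Prod.ext_iff] <;> omega

-- ===== VERDICT (by name: the statement is the Claim_ definition above) =====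
theorem calculate_zone_ratio_spec : Claim_equal_calculate_zone_ratio := by
  intro numbers _
  unfold Spec_calculate_zone_ratio calculate_zone_ratio calculate_zone_ratio_alt
  rcases numbers with _ | ⟨x, xs⟩
  · decide
  · simp only [reduceCtorEq, if_false, pvFoldB_eq]
    norm_num
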